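-- pv_equiv track=rewrite | github.com/Klaudia1303/student_code_analysis | Progetto-tirocinio2024/data/student_data/2064434_Mihu/LabPython07/A_Ex7.py | A_Ex7
-- ===== SOURCE A (Python) =====
-- def A_Ex7(s):
--     """MODIFICARE IL CONTENUTO DI QUESTA FUNZIONE PER SVOLGERE L'ESERCIZIO"""
--     lista=[]
--     listafinale = []
--     for i in range(len(s)):
--         if 65<=ord(s[i])<=90:
--             lista.append(s[i])
--
--     for i in lista:
--         if i not in listafinale:
--             listafinale.append(i)
--     listafinale.sort()
--     return listafinale
-- ===== SOURCE B (Python) =====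
-- def A_Ex7(s):
--     # scan the fixed alphabet A..Z once; membership test per letter gives
--     # the distinct uppercase letters already in sorted order (no dedup, no sort)
--     return [c for c in "ABCDEFGHIJKLMNOPQRSTUVWXYZ" if c in s]
-- ===== Notes on version B (the rewrite author's own statement) =====
-- stated objective: faster
-- what changed: Instead of A's three passes (collect uppercase chars per index, dedup by inner membership scan, sort), B scans the fixed 26-letter alphabet in order and keeps each letter contained in s, producing the distinct letters already sorted with no dedup pass and no sort.
import Mathlib
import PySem

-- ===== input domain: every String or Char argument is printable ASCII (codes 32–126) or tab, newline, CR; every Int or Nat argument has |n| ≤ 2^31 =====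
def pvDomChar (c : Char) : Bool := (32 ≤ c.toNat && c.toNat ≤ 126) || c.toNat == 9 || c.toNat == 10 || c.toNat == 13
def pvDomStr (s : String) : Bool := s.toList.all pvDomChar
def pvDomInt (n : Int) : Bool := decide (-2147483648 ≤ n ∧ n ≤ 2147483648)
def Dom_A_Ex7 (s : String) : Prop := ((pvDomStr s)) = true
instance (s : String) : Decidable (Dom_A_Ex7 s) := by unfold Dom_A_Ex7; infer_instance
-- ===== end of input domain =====

-- B replaces A's collect/dedup/sort passes by one scan of the fixed alphabet "A".."Z" with a
-- substring test per letter, which yields the distinct uppercase letters already sorted.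

-- ===== PORT A =====
def A_Ex7 (s : String) : List String :=
  -- listafinale.sort() of (for i in lista: if i not in listafinale: listafinale.append(i))
  -- where lista = (for i in range(len(s)): if 65 <= ord(s[i]) <= 90: lista.append(s[i]))
  PySem.List.sorted
    ((s.toList.foldl
        (fun acc c => if 65 ≤ c.toNat ∧ c.toNat ≤ 90 then acc ++ [String.ofList [c]] else acc) []).foldl
      (fun acc x => if x ∉ acc then acc ++ [x] else acc) [])
    (fun x => x) false

-- ===== PORT B =====
def A_Ex7_alt (s : String) : List String :=
  -- [c for c in "ABCDEFGHIJKLMNOPQRSTUVWXYZ" if c in s]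
  "ABCDEFGHIJKLMNOPQRSTUVWXYZ".toList.foldl
    (fun acc c => if PySem.Str.isIn (String.ofList [c]) s then acc ++ [String.ofList [c]] else acc) []

-- ===== PRECONDITION & SPEC =====
def Spec_A_Ex7 (s : String) (out : List String) : Prop := out = A_Ex7_alt s
instance (s : String) (out : List String) : Decidable (Spec_A_Ex7 s out) := by unfold Spec_A_Ex7; infer_instance

-- ===== CLAIM (what is proved, stated in full; the proofs are below) =====
def Claim_equal_A_Ex7 : Prop := ∀ (s : String), Dom_A_Ex7 s → Spec_A_Ex7 s (A_Ex7 s)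

-- ===== LEMMAS AND PROOFS =====

-- the alphabet literal as a mapped range of code points
theorem pvUP_eq : "ABCDEFGHIJKLMNOPQRSTUVWXYZ".toList = (List.range' 65 26).map Char.ofNat := by
  decide

theorem pvMem_UP (c : Char) :
    c ∈ "ABCDEFGHIJKLMNOPQRSTUVWXYZ".toList ↔ (65 ≤ c.toNat ∧ c.toNat ≤ 90) := by
  rw [pvUP_eq]
  constructor
  · intro h
    obtain ⟨n, hn, rfl⟩ := List.mem_map.mp h
    rw [List.mem_range'_1] at hn
    have hv : n.isValidChar := Or.inl (by omega)
    rw [Char.toNat_ofNat, if_pos hv]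
    omega
  · rintro ⟨h1, h2⟩
    exact List.mem_map.mpr ⟨c.toNat, List.mem_range'_1.mpr ⟨h1, by omega⟩, Char.ofNat_toNat c⟩

theorem pvMk_inj : Function.Injective (fun c => String.ofList [c]) := by
  intro a b h
  have := congrArg String.toList h
  simpa using this

theorem pvMk_lt {a b : Char} (h : a < b) : String.ofList [a] < String.ofList [b] := by
  rw [String.lt_iff_toList_lt, String.toList_ofList, String.toList_ofList]
  exact List.Lex.rel h

theorem pvIsIn_single (c : Char) (s : String) :
    PySem.Str.isIn (String.ofList [c]) s = decide (c ∈ s.toList) := by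
  by_cases h : c ∈ s.toList
  · simp only [h, decide_true]
    rw [PySem.Str.isIn_iff_infix]
    simp [String.toList_ofList, List.singleton_infix_iff, h]
  · simp only [h, decide_false]
    rw [← Bool.not_eq_true, PySem.Str.isIn_iff_infix]
    simp [String.toList_ofList, List.singleton_infix_iff, h]

theorem pvKey (s : String) : A_Ex7 s = A_Ex7_alt s := by
  unfold A_Ex7 A_Ex7_alt
  rw [PySem.List.foldl_append_ite, PySem.List.foldl_append_if, List.nil_append, List.nil_append]
  set mk : Char → String := fun c => String.ofList [c] with hmk
  set L : List String := (s.toList.filter (fun c => decide (65 ≤ c.toNat ∧ c.toNat ≤ 90))).map mk with hL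
  set R : List String :=
    ("ABCDEFGHIJKLMNOPQRSTUVWXYZ".toList.filter
      (fun c => PySem.Str.isIn (String.ofList [c]) s)).map mk with hR
  have hdedup : L.foldl (fun acc x => if x ∉ acc then acc ++ [x] else acc) [] = PySem.Set.ofList L := by
    rw [PySem.Set.ofList_eq_foldl]
    refine PySem.List.foldl_congr_mem _ _ _ _ ?_
    intro acc x _
    rw [PySem.Set.add_eq_ite]
    by_cases h : x ∈ acc <;> simp [h]
  rw [hdedup]
  -- R is strictly increasing
  have hRsub : R.Sublist ("ABCDEFGHIJKLMNOPQRSTUVWXYZ".toList.map mk) :=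
    List.Sublist.map mk List.filter_sublist
  have hUPpw : ("ABCDEFGHIJKLMNOPQRSTUVWXYZ".toList.map mk).Pairwise (· < ·) := by
    refine List.Pairwise.map mk (fun a b h => pvMk_lt h) ?_
    decide
  have hRpw : R.Pairwise (· < ·) := hUPpw.sublist hRsub
  -- R is a permutation of the deduplicated L
  have hRnd : R.Nodup := by
    refine List.Nodup.map pvMk_inj (List.Nodup.filter _ ?_)
    decide
  have hperm : R.Perm (PySem.Set.ofList L) := by
    rw [List.perm_ext_iff_of_nodup hRnd (PySem.Set.nodup_ofList L)]
    intro x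
    rw [PySem.Set.mem_ofList, hR, hL]
    simp only [List.mem_map, List.mem_filter, pvIsIn_single, decide_eq_true_eq]
    constructor
    · rintro ⟨c, ⟨hUP, hcs⟩, rfl⟩
      exact ⟨c, ⟨hcs, (pvMem_UP c).mp hUP⟩, rfl⟩
    · rintro ⟨c, ⟨hcs, hrange⟩, rfl⟩
      exact ⟨c, ⟨(pvMem_UP c).mpr hrange, hcs⟩, rfl⟩
  exact PySem.List.sorted_eq_of_perm_of_pairwise_lt _ _ _ hperm hRpw

-- ===== VERDICT (by name: the statement is the Claim_ definition above) =====
theorem A_Ex7_spec : Claim_equal_A_Ex7 := by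
  intro s _
  unfold Spec_A_Ex7
  exact pvKey s
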